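-- pv_equiv track=rewrite | github.com/Averroes90/testingaiexplain | chunking/extract_sections.py | get_section_by_header
-- ===== SOURCE A (Python) =====
-- def get_section_by_header(header_label, parsed_lines):
--     """
--     A helper that finds a given header_label in parsed_lines (via is_section_header),
--     returns all lines (excluding the header line) from that header until the next different
--     header is encountered (or end of list) as a single string with newlines separating lines.
--     Those lines are removed from parsed_lines.
--
--     :param header_label: String, e.g. "TECHNICAL SKILLS", "PROFESSIONAL EXPERIENCE"
--     :param parsed_lines: The list of parsed line dictionaries
--     :return: (section_string, updated_parsed_lines)
--     """
--     section_lines = []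
--     i = 0
--
--     while i < len(parsed_lines):
--         line = parsed_lines[i]
--         if line.get("is_section_header") == header_label:
--             # Found the header; remove it and skip adding it to the output.
--             del parsed_lines[i]
--
--             # Now capture subsequent lines until we reach a new/different section header.
--             while i < len(parsed_lines):
--                 next_line = parsed_lines[i]
--                 next_header = next_line.get("is_section_header")
--                 if next_header is not None and next_header != header_label:
--                     break
--
--                 section_lines.append(next_line["line"])
--                 del parsed_lines[i]
--
--             # Only process the first matching section header.
--             break
--         else:
--             i += 1
--
--     section_string = "\n".join(section_lines)
--     return section_string, parsed_lines
-- ===== SOURCE B (Python) =====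
-- def get_section_by_header(header_label, parsed_lines):
--     # One flat pass with an explicit state machine: before / capturing / after.
--     BEFORE, CAPTURING, AFTER = 0, 1, 2
--     state = BEFORE
--     kept = []
--     section_lines = []
--     for line in parsed_lines:
--         if state == BEFORE:
--             if line.get("is_section_header") == header_label:
--                 state = CAPTURING  # drop the header line
--             else:
--                 kept.append(line)
--         elif state == CAPTURING:
--             h = line.get("is_section_header")
--             if h is not None and h != header_label:
--                 state = AFTER
--                 kept.append(line)
--             else:
--                 section_lines.append(line["line"])
--         else:
--             kept.append(line)
--     parsed_lines[:] = kept
--     return "\n".join(section_lines), parsed_lines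
-- ===== Notes on version B (the rewrite author's own statement) =====
-- stated objective: alternative
-- what changed: Replaces A's index-based while loops with in-place deletions by a single flat pass driven by an explicit before/capturing/after state machine that rebuilds the kept list and assigns it back via slice assignment.
-- outside the precondition, e.g. on get_section_by_header('H', [{'is_section_header': 'H'}, {'x': None}]): A raises KeyError, B raises KeyError
import Mathlib
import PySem

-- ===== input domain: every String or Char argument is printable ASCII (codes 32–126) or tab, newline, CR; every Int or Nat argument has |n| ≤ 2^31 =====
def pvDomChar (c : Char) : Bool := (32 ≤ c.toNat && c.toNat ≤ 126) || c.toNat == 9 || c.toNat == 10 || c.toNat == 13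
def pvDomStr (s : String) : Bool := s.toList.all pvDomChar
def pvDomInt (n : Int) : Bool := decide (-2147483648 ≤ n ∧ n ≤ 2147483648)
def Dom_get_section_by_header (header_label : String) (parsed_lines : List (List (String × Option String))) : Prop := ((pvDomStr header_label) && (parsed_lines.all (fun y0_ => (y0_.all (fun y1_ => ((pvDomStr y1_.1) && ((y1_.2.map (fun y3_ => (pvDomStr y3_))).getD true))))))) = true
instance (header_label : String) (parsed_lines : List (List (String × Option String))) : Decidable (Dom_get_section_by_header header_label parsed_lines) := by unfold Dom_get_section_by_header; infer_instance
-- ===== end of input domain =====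

-- B does the same extraction as A with one flat state-machine pass instead of A's index
-- loops with in-place deletions; RETURN-value equivalence only (both Pythons mutate
-- parsed_lines in place to the same final list).

-- line.get("is_section_header") : a dict is an assoc list, first match; a missing key or a
-- stored None both read as Python None, hence the Option.join.
def pvHdr (l : List (String × Option String)) : Option String :=
  (l.lookup "is_section_header").join

-- next_line["line"] then "\n".join(...): Pre_ guarantees the key is present with a string
-- value, so the .getD "" default is never reached on admitted inputs.
def pvLineVal (l : List (String × Option String)) : String :=
  ((l.lookup "line").join).getD ""

-- ===== PORT A =====
-- inner while: capture lines until a different header (or end); deleted lines are consumed.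
def aCapture (header_label : String) : List (List (String × Option String)) → List String × List (List (String × Option String))
  | [] => ([], [])
  | l :: rest =>
    let h := pvHdr l
    if h ≠ none ∧ h ≠ some header_label then ([], l :: rest)
    else
      let r := aCapture header_label rest
      (pvLineVal l :: r.1, r.2)

-- outer while: scan with i += 1 (kept prefix) until the header is found, then delete it and capture.
def aOuter (header_label : String) : List (List (String × Option String)) → List String × List (List (String × Option String))
  | [] => ([], [])
  | l :: rest =>
    if pvHdr l = some header_label then aCapture header_label rest
    else
      let r := aOuter header_label rest
      (r.1, l :: r.2)

def get_section_by_header (header_label : String) (parsed_lines : List (List (String × Option String))) : String × (List (List (String × Option String))) :=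
  let r := aOuter header_label parsed_lines
  (PySem.Str.join "\n" r.1, r.2)

-- ===== PORT B =====
-- one fold over parsed_lines; state 0 = before, 1 = capturing, 2 = after.
def bStep (header_label : String) (s : Nat × List (List (String × Option String)) × List String) (l : List (String × Option String)) : Nat × List (List (String × Option String)) × List String :=
  let st := s.1
  let kept := s.2.1
  let sec := s.2.2
  if st = 0 then
    if pvHdr l = some header_label then (1, kept, sec)
    else (0, kept ++ [l], sec)
  else if st = 1 then
    let h := pvHdr l
    if h ≠ none ∧ h ≠ some header_label then (2, kept ++ [l], sec)
    else (1, kept, sec ++ [pvLineVal l])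
  else (st, kept ++ [l], sec)

def get_section_by_header_alt (header_label : String) (parsed_lines : List (List (String × Option String))) : String × (List (List (String × Option String))) :=
  let r := parsed_lines.foldl (bStep header_label) (0, [], [])
  (PySem.Str.join "\n" r.2.2, r.2.1)

-- ===== PRECONDITION & SPEC =====
-- Pre_ excludes exactly the inputs on which A raises: a line inside the captured section
-- (after the first header_label header, before the next different header) whose "line" key
-- is missing (KeyError) or stored as None ("\n".join then raises TypeError).
def Pre_get_section_by_header (header_label : String) (parsed_lines : List (List (String × Option String))) : Prop :=
  ∀ l ∈ ((parsed_lines.dropWhile (fun l => ¬ pvHdr l = some header_label)).tail.takeWhile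
      (fun l => pvHdr l = none ∨ pvHdr l = some header_label)),
    ((l.lookup "line").join).isSome = true
instance (header_label : String) (parsed_lines : List (List (String × Option String))) : Decidable (Pre_get_section_by_header header_label parsed_lines) := by unfold Pre_get_section_by_header; infer_instance

def pvWitness_get_section_by_header : String × (List (List (String × Option String))) :=
  ("H", [[("line", some "intro")], [("is_section_header", some "H")], [("line", some "a")], [("is_section_header", some "G"), ("line", some "b")]])

def Spec_get_section_by_header (header_label : String) (parsed_lines : List (List (String × Option String))) (out : String × (List (List (String × Option String)))) : Prop := out = get_section_by_header_alt header_label parsed_lines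
instance (header_label : String) (parsed_lines : List (List (String × Option String))) (out : String × (List (List (String × Option String)))) : Decidable (Spec_get_section_by_header header_label parsed_lines out) := by unfold Spec_get_section_by_header; infer_instance

-- ===== CLAIM (what is proved, stated in full; the proofs are below) =====
def Claim_equal_get_section_by_header : Prop := ∀ (header_label : String) (parsed_lines : List (List (String × Option String))), Dom_get_section_by_header header_label parsed_lines → Pre_get_section_by_header header_label parsed_lines → Spec_get_section_by_header header_label parsed_lines (get_section_by_header header_label parsed_lines)

-- ===== LEMMAS AND PROOFS =====

-- state 2: everything remaining is kept unchanged.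
theorem bFold_state2 (header_label : String) (lines : List (List (String × Option String))) :
    ∀ kept sec, lines.foldl (bStep header_label) (2, kept, sec) = (2, kept ++ lines, sec) := by
  induction lines with
  | nil => simp
  | cons l rest ih =>
    intro kept sec
    simp only [List.foldl_cons, bStep]
    norm_num
    rw [ih]
    simp

-- state 1 computes exactly what A's inner capture loop computes.
theorem bFold_state1 (header_label : String) (lines : List (List (String × Option String))) :
    ∀ kept sec, (lines.foldl (bStep header_label) (1, kept, sec)).2
      = (kept ++ (aCapture header_label lines).2, sec ++ (aCapture header_label lines).1) := by
  induction lines with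
  | nil => simp [aCapture]
  | cons l rest ih =>
    intro kept sec
    by_cases hb : pvHdr l ≠ none ∧ pvHdr l ≠ some header_label
    · simp only [List.foldl_cons, bStep, aCapture]
      rw [if_pos hb]
      norm_num
      rw [bFold_state2]
      simp [hb]
    · simp only [List.foldl_cons, bStep, aCapture]
      rw [if_neg hb]
      norm_num
      rw [ih]
      simp [hb]

-- state 0 computes exactly what A's outer loop computes.
theorem bFold_state0 (header_label : String) (lines : List (List (String × Option String))) :
    ∀ kept sec, (lines.foldl (bStep header_label) (0, kept, sec)).2
      = (kept ++ (aOuter header_label lines).2, sec ++ (aOuter header_label lines).1) := by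
  induction lines with
  | nil => simp [aOuter]
  | cons l rest ih =>
    intro kept sec
    by_cases hh : pvHdr l = some header_label
    · simp only [List.foldl_cons, bStep, aOuter]
      rw [if_pos hh]
      norm_num
      rw [bFold_state1]
      simp [hh]
    · simp only [List.foldl_cons, bStep, aOuter]
      rw [if_neg hh]
      norm_num
      rw [ih]
      simp [hh]

-- ===== VERDICT (by name: the statement is the Claim_ definition above) =====
theorem get_section_by_header_spec : Claim_equal_get_section_by_header := by
  intro header_label parsed_lines _ _
  unfold Spec_get_section_by_header get_section_by_header get_section_by_header_alt
  have h := bFold_state0 header_label parsed_lines [] []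
  simp only [List.nil_append] at h
  simp [h]
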